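-- pv_equiv track=rewrite | github.com/brandonw3612/masten | mast/utils.py | formatted_source
-- ===== SOURCE A (Python) =====
-- def formatted_source(src: str) -> str:
--     lines = [l.strip() for l in src.split('\n')]
--     indent = 0
--     for i in range(len(lines)):
--         if lines[i].startswith('}'):
--             indent -= 4
--         lines[i] = ' ' * indent + lines[i]
--         if lines[i].endswith('{'):
--             indent += 4
--     return '\n'.join(lines)
-- ===== SOURCE B (Python) =====
-- def formatted_source(src: str) -> str:
--     stripped = [l.strip() for l in src.split('\n')]
--
--     def level(i):
--         # indentation is positional: 4 spaces per '{'-opening line strictly before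
--         # line i, minus 4 per '}'-closing line up to and including line i
--         opens = sum(1 for s in stripped[:i] if s.endswith('{'))
--         closes = sum(1 for s in stripped[:i + 1] if s.startswith('}'))
--         return 4 * (opens - closes)
--
--     return '\n'.join(' ' * level(i) + stripped[i] for i in range(len(stripped)))
-- ===== Notes on version B (the rewrite author's own statement) =====
-- stated objective: alternative
-- what changed: Replaces A's stateful running counter (mutated in place while rewriting lines) with a stateless positional formula: each line's indent is computed independently as 4*(number of '{'-ending lines before it minus number of '}'-starting lines up to and including it), counted over list slices with no carried accumulator.
import Mathlib
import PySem

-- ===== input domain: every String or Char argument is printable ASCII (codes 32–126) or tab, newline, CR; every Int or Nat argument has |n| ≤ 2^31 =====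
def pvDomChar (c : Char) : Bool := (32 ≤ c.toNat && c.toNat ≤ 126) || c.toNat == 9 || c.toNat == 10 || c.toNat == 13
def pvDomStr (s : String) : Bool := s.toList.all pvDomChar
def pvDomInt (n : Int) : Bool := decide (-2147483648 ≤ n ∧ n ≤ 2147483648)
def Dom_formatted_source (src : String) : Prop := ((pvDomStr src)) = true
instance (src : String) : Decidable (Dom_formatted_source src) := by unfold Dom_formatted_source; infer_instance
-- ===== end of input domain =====

-- B replaces A's stateful in-place counter loop with a stateless positional formula: each line's
-- indent is 4*(opening lines strictly before it minus closing lines up to and including it),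
-- computed independently per line (objective: alternative; O(n^2) vs A's O(n)).


-- ===== PORT A =====
-- A's 'for i in range(len(lines))' rewriting lines[i] in place, carrying indent
def fsLoopA : List (List Char) → Int → List (List Char)
  | [], _ => []
  | l :: rest, indent =>
    let indent1 := if PySem.Chars.startswith l ['}'] then indent - 4 else indent
    let l' := List.replicate indent1.toNat ' ' ++ l
    let indent2 := if PySem.Chars.endswith l' ['{'] then indent1 + 4 else indent1
    l' :: fsLoopA rest indent2

def formatted_source (src : String) : String :=
  let lines := (PySem.Chars.splitOn src.toList ['\n']).map PySem.Chars.strip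
  String.ofList (PySem.Chars.join ['\n'] (fsLoopA lines 0))

-- ===== PORT B =====
-- B's per-line positional level: 4*(count of '{'-ending lines in stripped[:i])
--                              − 4*(count of '}'-starting lines in stripped[:i+1]); no carried state
def fsLevel (stripped : List (List Char)) (i : Nat) : Int :=
  4 * ((stripped.take i).countP (fun s => PySem.Chars.endswith s ['{']) : Int)
  - 4 * ((stripped.take (i + 1)).countP (fun s => PySem.Chars.startswith s ['}']) : Int)

def formatted_source_alt (src : String) : String :=
  let stripped := (PySem.Chars.splitOn src.toList ['\n']).map PySem.Chars.strip
  String.ofList (PySem.Chars.join ['\n']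
    ((List.range stripped.length).map (fun i =>
      List.replicate (fsLevel stripped i).toNat ' ' ++ stripped.getD i [])))

-- ===== PRECONDITION & SPEC =====
def Spec_formatted_source (src : String) (out : String) : Prop := out = formatted_source_alt src
instance (src : String) (out : String) : Decidable (Spec_formatted_source src out) := by unfold Spec_formatted_source; infer_instance

-- ===== CLAIM (what is proved, stated in full; the proofs are below) =====
def Claim_equal_formatted_source : Prop := ∀ (src : String), Dom_formatted_source src → Spec_formatted_source src (formatted_source src)

-- ===== LEMMAS AND PROOFS =====

-- proof-only helper: the running scan both programs are equal to
def fsScan : List (Int × Int) → Int → List Int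
  | [], _ => []
  | (pre, post) :: rest, depth => (depth + pre) :: fsScan rest (depth + pre + post)

def fsDelta (s : List Char) : Int × Int :=
  ((if PySem.Chars.startswith s ['}'] then (-4 : Int) else 0),
   (if PySem.Chars.endswith s ['{'] then (4 : Int) else 0))

-- a trailing '{' is unaffected by prepended spaces (also when the line is empty)
theorem endswith_pad (A l : List Char) (c : Char) (hA : ∀ x ∈ A, x ≠ c) :
    PySem.Chars.endswith (A ++ l) [c] = PySem.Chars.endswith l [c] := by
  rw [Bool.eq_iff_iff, PySem.Chars.endswith_iff, PySem.Chars.endswith_iff]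
  constructor
  · rintro ⟨t, ht⟩
    rcases List.eq_nil_or_concat l with rfl | ⟨m, x, rfl⟩
    · exfalso
      have hc : c ∈ A := by
        have h1 : A = t ++ [c] := by simpa using ht.symm
        simp [h1]
      exact hA c hc rfl
    · have hlast : (A ++ (m ++ [x])).getLast? = some c := by
        rw [show A ++ (m ++ [x]) = t ++ [c] by simpa using ht.symm]
        exact List.getLast?_concat
      have hx : x = c := by
        rw [List.getLast?_append_of_ne_nil A (by simp)] at hlast
        simpa using hlast
      exact ⟨m, by rw [hx]; simp⟩
  · exact fun h => h.trans (List.suffix_append A l)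

-- A's in-place loop equals the scan, padding each line with the scan's current value
theorem loopA_eq_scan (ls : List (List Char)) (d : Int) :
    fsLoopA ls d =
      List.zipWith (fun lv s => List.replicate (Int.toNat lv) ' ' ++ s)
        (fsScan (ls.map fsDelta) d) ls := by
  induction ls generalizing d with
  | nil => rfl
  | cons l rest ih =>
    have hend : PySem.Chars.endswith
        (List.replicate (Int.toNat (if PySem.Chars.startswith l ['}'] then d - 4 else d)) ' ' ++ l) ['{']
        = PySem.Chars.endswith l ['{'] := by
      apply endswith_pad
      intro x hx
      simp only [List.mem_replicate] at hx
      rw [hx.2]; decide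
    simp only [fsLoopA, fsScan, List.map_cons, List.zipWith_cons_cons, hend, fsDelta]
    congr 1
    · congr 2
      split_ifs <;> omega
    · rw [ih]
      congr 2
      split_ifs <;> omega

-- the scan equals B's closed positional formula, shifted by the initial depth d
theorem scan_eq_closed (ls : List (List Char)) (d : Int) :
    List.zipWith (fun lv s => List.replicate (Int.toNat lv) ' ' ++ s)
        (fsScan (ls.map fsDelta) d) ls
    = (List.range ls.length).map (fun i =>
        List.replicate (d + fsLevel ls i).toNat ' ' ++ ls.getD i []) := by
  induction ls generalizing d with
  | nil => rfl
  | cons l rest ih =>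
    simp only [List.map_cons, fsScan, List.zipWith_cons_cons, List.length_cons,
      List.range_succ_eq_map, List.map_map]
    congr 1
    · have : d + fsLevel (l :: rest) 0 = d + (fsDelta l).1 := by
        simp only [fsLevel, fsDelta, List.take_zero, List.take_succ_cons, List.take_zero,
          List.countP_nil, List.countP_cons]
        split_ifs <;> simp
      simp [fsDelta] at this ⊢
      rw [this]
    · rw [ih (d + (fsDelta l).1 + (fsDelta l).2)]
      apply List.map_congr_left
      intro i _
      have : d + (fsDelta l).1 + (fsDelta l).2 + fsLevel rest i
           = d + fsLevel (l :: rest) (i + 1) := by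
        simp only [fsLevel, fsDelta, List.take_succ_cons, List.countP_cons]
        split_ifs <;> push_cast <;> ring
      simp only [Function.comp, List.getD_cons_succ, this]

-- ===== VERDICT (by name: the statement is the Claim_ definition above) =====
theorem formatted_source_spec : Claim_equal_formatted_source := by
  intro src _
  unfold Spec_formatted_source formatted_source formatted_source_alt
  simp only [loopA_eq_scan, scan_eq_closed, zero_add]
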